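-- pv_equiv track=rewrite | github.com/Shikhar03Stark/Code-Dump | ETC/misc/demo.py | consecutiveCount
-- ===== SOURCE A (Python) =====
-- def consecutiveCount(s, char):
--     ans = 0
--     n = len(s)
--     cont = 0
--     for i in range(n):
--         if s[i] == char:
--             cont += 1
--         else:
--             ans += max(0, cont-2)
--             cont = 0
--
--     ans += max(0, cont-2)
--     return ans
-- ===== SOURCE B (Python) =====
-- def consecutiveCount(s, char):
--     # Build a run-length encoding of s first, then reduce over the runs.
--     runs = []
--     for ch in s:
--         if runs and runs[-1][0] == ch:
--             runs[-1][1] += 1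
--         else:
--             runs.append([ch, 1])
--     return sum(max(0, k - 2) for c, k in runs if c == char)
-- ===== Notes on version B (the rewrite author's own statement) =====
-- stated objective: alternative
-- what changed: B first builds a run-length encoding of the string and then sums max(0, len-2) over the runs whose character equals char, instead of A's single pass with a per-character counter flushed on every mismatch.
import Mathlib
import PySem

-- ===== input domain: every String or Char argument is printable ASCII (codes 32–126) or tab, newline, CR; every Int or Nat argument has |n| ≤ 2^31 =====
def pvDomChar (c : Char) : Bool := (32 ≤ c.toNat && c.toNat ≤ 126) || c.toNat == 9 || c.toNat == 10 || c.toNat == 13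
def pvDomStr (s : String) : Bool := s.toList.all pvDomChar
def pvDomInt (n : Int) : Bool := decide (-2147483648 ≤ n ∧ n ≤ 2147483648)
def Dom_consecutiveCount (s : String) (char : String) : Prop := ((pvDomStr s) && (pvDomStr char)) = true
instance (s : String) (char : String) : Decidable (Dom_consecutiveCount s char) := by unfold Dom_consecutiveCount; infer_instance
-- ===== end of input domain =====

-- B builds a run-length encoding first and then reduces over the runs (alternative decomposition of A's counter-flush loop); equal on all inputs.


-- ===== PORT A =====
-- one pass; state (ans, cont): cont counts the current streak of chars equal to `char`,
-- flushed as max 0 (cont-2) on each mismatch and once more at the end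
def consecutiveCount (s : String) (char : String) : Int :=
  let st := s.toList.foldl
    (fun (st : Int × Int) c =>
      if String.ofList [c] == char then (st.1, st.2 + 1)
      else (st.1 + max 0 (st.2 - 2), 0)) (0, 0)
  st.1 + max 0 (st.2 - 2)

-- ===== PORT B =====
-- phase 1: run-length encode s (runs kept reversed while building, then reversed back,
-- mirroring Source B's append/ update-last); phase 2: sum max 0 (k-2) over runs matching char
def consecutiveCount_alt (s : String) (char : String) : Int :=
  let revRuns := s.toList.foldl
    (fun (rs : List (Char × Int)) ch =>
      match rs with
      | (d, k) :: rest => if d == ch then (d, k + 1) :: rest else (ch, 1) :: (d, k) :: rest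
      | [] => [(ch, 1)]) []
  let runs := revRuns.reverse
  ((runs.filter (fun p => String.ofList [p.1] == char)).map (fun p => max 0 (p.2 - 2))).sum

-- ===== PRECONDITION & SPEC =====
def Spec_consecutiveCount (s : String) (char : String) (out : Int) : Prop := out = consecutiveCount_alt s char
instance (s : String) (char : String) (out : Int) : Decidable (Spec_consecutiveCount s char out) := by unfold Spec_consecutiveCount; infer_instance

-- ===== CLAIM (what is proved, stated in full; the proofs are below) =====
def Claim_equal_consecutiveCount : Prop := ∀ (s : String) (char : String), Dom_consecutiveCount s char → Spec_consecutiveCount s char (consecutiveCount s char)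

-- ===== LEMMAS AND PROOFS =====

-- specification function: pvG char cont t = what A's loop adds from here on, given current streak cont
def pvG (char : String) : Int → List Char → Int
  | cont, [] => max 0 (cont - 2)
  | cont, c :: t => if String.ofList [c] == char then pvG char (cont + 1) t
                    else max 0 (cont - 2) + pvG char 0 t

def pvStepA (char : String) (st : Int × Int) (c : Char) : Int × Int :=
  if String.ofList [c] == char then (st.1, st.2 + 1) else (st.1 + max 0 (st.2 - 2), 0)

def pvStepB (char : String) (rs : List (Char × Int)) (ch : Char) : List (Char × Int) :=
  match rs with
  | (d, k) :: rest => if d == ch then (d, k + 1) :: rest else (ch, 1) :: (d, k) :: rest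
  | [] => [(ch, 1)]

def pvSumF (char : String) (rs : List (Char × Int)) : Int :=
  ((rs.filter (fun p => String.ofList [p.1] == char)).map (fun p => max 0 (p.2 - 2))).sum

lemma pvA_loop (char : String) (t : List Char) : ∀ ans cont : Int,
    (t.foldl (pvStepA char) (ans, cont)).1 + max 0 ((t.foldl (pvStepA char) (ans, cont)).2 - 2)
      = ans + pvG char cont t := by
  induction t with
  | nil => intro ans cont; simp [pvG]
  | cons c t ih =>
    intro ans cont
    simp only [List.foldl_cons, pvStepA, pvG]
    split_ifs with h
    · simpa using ih ans (cont + 1)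
    · rw [ih (ans + max 0 (cont - 2)) 0]; ring

lemma pvMatch_unique {char : String} {c d : Char}
    (hc : (String.ofList [c] == char) = true) (hd : (String.ofList [d] == char) = true) : c = d := by
  have h1 : String.ofList [c] = char := by exact eq_of_beq hc
  have h2 : String.ofList [d] = char := by exact eq_of_beq hd
  have h3 : String.ofList [c] = String.ofList [d] := h1.trans h2.symm
  have h4 := congrArg String.toList h3
  simpa using h4

lemma pvSumF_append (char : String) (xs ys : List (Char × Int)) :
    pvSumF char (xs ++ ys) = pvSumF char xs + pvSumF char ys := by
  simp [pvSumF, List.filter_append]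

lemma pvB_inert (char : String) (t : List Char) : ∀ (d : Char) (k : Int) (X rest : List (Char × Int)),
    t.foldl (pvStepB char) (((d, k) :: X) ++ rest) = (t.foldl (pvStepB char) ((d, k) :: X)) ++ rest := by
  induction t with
  | nil => intros; rfl
  | cons c t ih =>
    intro d k X rest
    by_cases h : (d == c) = true
    · simp only [List.foldl_cons, List.cons_append, pvStepB, h, if_true]
      exact ih d (k + 1) X rest
    · simp only [List.foldl_cons, List.cons_append, pvStepB, h, Bool.false_eq_true, if_false]
      exact ih c 1 ((d, k) :: X) rest

lemma pvB_run (char : String) (t : List Char) : ∀ (c : Char) (k : Int),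
    pvSumF char (t.foldl (pvStepB char) [(c, k)])
      = pvG char (if String.ofList [c] == char then k else 0) t := by
  induction t with
  | nil =>
    intro c k
    by_cases h : (String.ofList [c] == char) = true <;> simp [pvSumF, pvG, h]
  | cons d t ih =>
    intro c k
    by_cases h : (c == d) = true
    · -- d = c: extend the run
      have hcd : c = d := eq_of_beq h
      subst hcd
      simp only [List.foldl_cons, pvStepB, h, if_true]
      rw [ih c (k + 1)]
      by_cases hm : (String.ofList [c] == char) = true <;> simp [pvG, hm]
    · -- new run starts
      simp only [List.foldl_cons, pvStepB, h, Bool.false_eq_true, if_false]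
      have hsplit := pvB_inert char t d 1 [] [(c, k)]
      simp only [List.cons_append, List.nil_append] at hsplit
      rw [hsplit, pvSumF_append, ih d 1]
      by_cases hc : (String.ofList [c] == char) = true
      · have hd : ¬ (String.ofList [d] == char) = true :=
          fun hd => h (by simp [pvMatch_unique hc hd])
        simp [pvG, hc, hd, pvSumF]
        ring
      · by_cases hd : (String.ofList [d] == char) = true <;>
          simp [pvG, hc, hd, pvSumF]

lemma pvSumF_reverse (char : String) (rs : List (Char × Int)) :
    pvSumF char rs.reverse = pvSumF char rs := by
  simp [pvSumF, List.filter_reverse, List.map_reverse]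

-- ===== VERDICT (by name: the statement is the Claim_ definition above) =====
theorem consecutiveCount_spec : Claim_equal_consecutiveCount := by
  intro s char _
  unfold Spec_consecutiveCount consecutiveCount consecutiveCount_alt
  show (s.toList.foldl (pvStepA char) (0, 0)).1 + max 0 ((s.toList.foldl (pvStepA char) (0, 0)).2 - 2)
      = pvSumF char (s.toList.foldl (pvStepB char) []).reverse
  rw [pvSumF_reverse, pvA_loop]
  cases s.toList with
  | nil => simp [pvSumF, pvG]
  | cons c t =>
    simp only [List.foldl_cons, pvStepB]
    rw [pvB_run]
    by_cases h : (String.ofList [c] == char) = true <;> simp [pvG, h]
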